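-- pv_equiv track=rewrite | github.com/AlFontal/sdcpy-map | src/sdcpy_map/layers.py | _iter_event_centers
-- ===== SOURCE A (Python) =====
-- def _event_window_bounds(event_idx: int, width: int, series_len: int) -> tuple[int, int] | None:
--     half_before = (width - 1) // 2
--     half_after = width - 1 - half_before
--     start = int(event_idx) - half_before
--     stop = int(event_idx) + half_after + 1
--     if start < 0 or stop > int(series_len):
--         return None
--     return start, stop
--
-- def _iter_event_centers(event_idx: int, width: int, series_len: int) -> list[int]:
--     """Return admissible fragment centers inside the local event neighborhood."""
--     half_before = (int(width) - 1) // 2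
--     half_after = int(width) - 1 - half_before
--     centers: list[int] = []
--     for offset in range(-half_before, half_after + 1):
--         center_idx = int(event_idx) + int(offset)
--         if _event_window_bounds(center_idx, int(width), int(series_len)) is not None:
--             centers.append(center_idx)
--     return centers
-- ===== SOURCE B (Python) =====
-- def _iter_event_centers(event_idx: int, width: int, series_len: int) -> list[int]:
--     """Return admissible fragment centers inside the local event neighborhood."""
--     half_before = (int(width) - 1) // 2
--     half_after = int(width) - 1 - half_before
--     lo = max(int(event_idx) - half_before, half_before)
--     hi = min(int(event_idx) + half_after, int(series_len) - 1 - half_after)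
--     return list(range(lo, hi + 1))
-- ===== Notes on version B (the rewrite author's own statement) =====
-- stated objective: faster
-- what changed: B replaces A's per-offset loop with a per-window-bounds check by a direct closed-form computation of the contiguous valid-center interval (intersection of the neighborhood interval with the in-bounds interval) returned as one range.
import Mathlib
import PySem

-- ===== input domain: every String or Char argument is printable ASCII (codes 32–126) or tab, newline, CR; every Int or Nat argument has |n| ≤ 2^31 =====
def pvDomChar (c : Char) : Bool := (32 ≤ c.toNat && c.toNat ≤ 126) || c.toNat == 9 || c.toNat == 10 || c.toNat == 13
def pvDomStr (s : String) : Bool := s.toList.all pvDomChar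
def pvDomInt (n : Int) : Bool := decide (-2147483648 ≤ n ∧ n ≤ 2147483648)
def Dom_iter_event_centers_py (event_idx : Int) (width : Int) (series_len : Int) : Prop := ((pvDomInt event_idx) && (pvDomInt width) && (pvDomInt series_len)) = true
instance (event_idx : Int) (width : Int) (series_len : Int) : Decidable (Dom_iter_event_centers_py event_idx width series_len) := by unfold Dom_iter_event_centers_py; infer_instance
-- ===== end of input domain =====

-- B computes the contiguous valid-center interval in closed form instead of scanning every offset (faster by mechanism of avoiding the per-offset bounds check).
-- ===== PORT A =====
def eventWindowBounds (event_idx : Int) (width : Int) (series_len : Int) : Option (Int × Int) :=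
  let half_before := PySem.Int.floordiv (width - 1) 2
  let half_after := width - 1 - half_before
  let start := event_idx - half_before
  let stop := event_idx + half_after + 1
  if start < 0 ∨ stop > series_len then none
  else some (start, stop)

def iter_event_centers_py (event_idx : Int) (width : Int) (series_len : Int) : List Int :=
  let half_before := PySem.Int.floordiv (width - 1) 2
  let half_after := width - 1 - half_before
  (PySem.List.pyRange (-half_before) (half_after + 1) 1).foldl
    (fun centers offset =>
      let center_idx := event_idx + offset
      if (eventWindowBounds center_idx width series_len).isSome then centers ++ [center_idx]
      else centers) []

-- ===== PORT B =====
def iter_event_centers_py_alt (event_idx : Int) (width : Int) (series_len : Int) : List Int :=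
  let half_before := PySem.Int.floordiv (width - 1) 2
  let half_after := width - 1 - half_before
  let lo := max (event_idx - half_before) half_before
  let hi := min (event_idx + half_after) (series_len - 1 - half_after)
  PySem.List.pyRange lo (hi + 1) 1

-- ===== PRECONDITION & SPEC =====
def Spec_iter_event_centers_py (event_idx : Int) (width : Int) (series_len : Int) (out : List Int) : Prop := out = iter_event_centers_py_alt event_idx width series_len
instance (event_idx : Int) (width : Int) (series_len : Int) (out : List Int) : Decidable (Spec_iter_event_centers_py event_idx width series_len out) := by unfold Spec_iter_event_centers_py; infer_instance

-- ===== CLAIM (what is proved, stated in full; the proofs are below) =====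
def Claim_equal_iter_event_centers_py : Prop := ∀ (event_idx : Int) (width : Int) (series_len : Int), Dom_iter_event_centers_py event_idx width series_len → Spec_iter_event_centers_py event_idx width series_len (iter_event_centers_py event_idx width series_len)

-- ===== LEMMAS AND PROOFS =====

-- ===== VERDICT (by name: the statement is the Claim_ definition above) =====
theorem eq_of_pairwise_lt_ext {l1 l2 : List Int} (h1 : l1.Pairwise (· < ·))
    (h2 : l2.Pairwise (· < ·)) (h : ∀ x, x ∈ l1 ↔ x ∈ l2) : l1 = l2 := by
  have n1 : l1.Nodup := h1.imp fun hlt => Int.ne_of_lt hlt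
  have n2 : l2.Nodup := h2.imp fun hlt => Int.ne_of_lt hlt
  exact ((List.perm_ext_iff_of_nodup n1 n2).2 h).eq_of_pairwise
    (fun a b _ _ hab hba => absurd hba (Int.not_lt.2 (Int.le_of_lt hab))) h1 h2

theorem map_add_pyRange (c a b : Int) :
    (PySem.List.pyRange a b 1).map (fun o => c + o) = PySem.List.pyRange (c + a) (c + b) 1 := by
  rw [PySem.List.pyRange_one, PySem.List.pyRange_one, List.map_map]
  have : c + b - (c + a) = b - a := by ring
  rw [this]
  apply List.map_congr_left
  intro k _
  simp
  ring

theorem filt_eq (a b lo hi : Int) :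
    (PySem.List.pyRange a b 1).filter (fun c => decide (lo ≤ c ∧ c ≤ hi))
      = PySem.List.pyRange (max a lo) (min (b - 1) hi + 1) 1 := by
  apply eq_of_pairwise_lt_ext
  · exact (PySem.List.pairwise_lt_pyRange_one a b).filter _
  · exact PySem.List.pairwise_lt_pyRange_one _ _
  · intro x
    simp [List.mem_filter, PySem.List.mem_pyRange_one]
    omega

theorem iter_event_centers_py_spec : Claim_equal_iter_event_centers_py := by
  intro event_idx width series_len _
  unfold Spec_iter_event_centers_py iter_event_centers_py iter_event_centers_py_alt
  simp only []
  set hb := PySem.Int.floordiv (width - 1) 2 with hhb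
  set ha := width - 1 - hb with hha
  rw [show (fun (centers : List Int) (offset : Int) =>
        let center_idx := event_idx + offset
        if (eventWindowBounds center_idx width series_len).isSome then centers ++ [center_idx]
        else centers)
      = (fun centers offset =>
        if (fun o => decide (hb ≤ event_idx + o ∧ event_idx + o ≤ series_len - 1 - ha)) offset = true
        then centers ++ [(fun o => event_idx + o) offset] else centers) from ?_]
  · rw [PySem.List.foldl_append_if]
    have : (PySem.List.pyRange (-hb) (ha + 1) 1).filter
          (fun o => decide (hb ≤ event_idx + o ∧ event_idx + o ≤ series_len - 1 - ha))
        = (PySem.List.pyRange (-hb) (ha + 1) 1).filter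
          (fun o => decide (hb - event_idx ≤ o ∧ o ≤ series_len - 1 - ha - event_idx)) := by
      apply List.filter_congr
      intro o _
      simp only [decide_eq_decide]
      omega
    rw [this, filt_eq]
    rw [List.nil_append, map_add_pyRange]
    congr 1 <;> omega
  · funext centers offset
    simp only [eventWindowBounds]
    split_ifs with h1 h2 h2 <;> simp_all <;> omega
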